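-- pv_equiv track=rewrite | github.com/edwardchang7/engg4000 | src/backend/tonal_patterns.py | confirm_pattern_length
-- ===== SOURCE A (Python) =====
-- min_pattern_length = 3
--
-- max_pattern_length = 16
--
-- def confirm_pattern_length(start_index, end_index, bar_indices):
--     '''
--             Determines if the given pattern is within the allowed length, preset with constants
--
--             Param:
--                 start_index: The index of the start of the pattern in the note list
--                 end_index: The index of the end of the pattern in the note list
--                 bar_indices: indicates which values to omit because they are note notes
--
--             Return:
--                 True or False if pattern length is within range
--     '''
--
--     pattern_length = 1
--     for i in range(start_index, end_index):
--         if i in bar_indices: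
--             pattern_length += 1
--
--     if (pattern_length >= min_pattern_length) and (pattern_length <= max_pattern_length):
--         return True
--     else:
--         return False
-- ===== SOURCE B (Python) =====
-- min_pattern_length = 3
--
-- max_pattern_length = 16
--
-- def confirm_pattern_length(start_index, end_index, bar_indices):
--     # One pass over bar_indices instead of scanning the whole range(start_index, end_index).
--     hits = len({x for x in bar_indices if start_index <= x < end_index})
--     return min_pattern_length <= 1 + hits <= max_pattern_length
-- ===== Notes on version B (the rewrite author's own statement) =====
-- stated objective: alternative
-- what changed: Instead of scanning every index of range(start,end) and testing membership in bar_indices, B makes one pass over bar_indices, counting its distinct elements that fall in [start,end).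
import Mathlib
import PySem

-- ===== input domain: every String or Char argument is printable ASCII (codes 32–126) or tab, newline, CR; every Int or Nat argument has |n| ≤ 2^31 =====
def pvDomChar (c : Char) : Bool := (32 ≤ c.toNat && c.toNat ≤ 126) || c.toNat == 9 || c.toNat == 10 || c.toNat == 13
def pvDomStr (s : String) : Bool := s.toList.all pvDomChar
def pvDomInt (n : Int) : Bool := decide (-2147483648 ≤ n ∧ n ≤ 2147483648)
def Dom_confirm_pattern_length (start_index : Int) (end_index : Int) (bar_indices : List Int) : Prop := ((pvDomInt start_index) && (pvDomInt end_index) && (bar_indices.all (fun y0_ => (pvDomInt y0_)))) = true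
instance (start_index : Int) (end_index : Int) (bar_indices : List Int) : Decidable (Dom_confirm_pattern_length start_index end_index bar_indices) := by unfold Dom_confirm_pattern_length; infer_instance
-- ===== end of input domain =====

-- B replaces A's scan of the whole range(start,end) (membership test per index) by one pass
-- over bar_indices counting its distinct elements inside [start,end); same return value.

-- ===== PORT A =====
def confirm_pattern_length (start_index : Int) (end_index : Int) (bar_indices : List Int) : Bool :=
  let pattern_length : Int :=
    (PySem.List.pyRange start_index end_index 1).foldl
      (fun acc i => if bar_indices.contains i then acc + 1 else acc) 1
  if 3 ≤ pattern_length ∧ pattern_length ≤ 16 then true else false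

-- ===== PORT B =====
def confirm_pattern_length_alt (start_index : Int) (end_index : Int) (bar_indices : List Int) : Bool :=
  let hits : Int :=
    (PySem.Set.ofList (bar_indices.filter (fun x => start_index ≤ x && x < end_index))).length
  decide (3 ≤ 1 + hits ∧ 1 + hits ≤ 16)

-- ===== PRECONDITION & SPEC =====
def Spec_confirm_pattern_length (start_index : Int) (end_index : Int) (bar_indices : List Int) (out : Bool) : Prop := out = confirm_pattern_length_alt start_index end_index bar_indices
instance (start_index : Int) (end_index : Int) (bar_indices : List Int) (out : Bool) : Decidable (Spec_confirm_pattern_length start_index end_index bar_indices out) := by unfold Spec_confirm_pattern_length; infer_instance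

-- ===== CLAIM (what is proved, stated in full; the proofs are below) =====
def Claim_equal_confirm_pattern_length : Prop := ∀ (start_index : Int) (end_index : Int) (bar_indices : List Int), Dom_confirm_pattern_length start_index end_index bar_indices → Spec_confirm_pattern_length start_index end_index bar_indices (confirm_pattern_length start_index end_index bar_indices)

-- ===== LEMMAS AND PROOFS =====

-- A's count of range indices lying in bar_indices = B's count of distinct bar_indices in range.
theorem count_eq (s e : Int) (bar : List Int) :
    ((PySem.List.pyRange s e 1).countP (fun i => bar.contains i) : Int)
      = ((PySem.Set.ofList (bar.filter (fun x => s ≤ x && x < e))).length : Int) := by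
  have h1 : ((PySem.List.pyRange s e 1).filter (fun i => bar.contains i)).Nodup :=
    (PySem.List.nodup_pyRange_one s e).filter _
  have h2 : (PySem.Set.ofList (bar.filter (fun x => s ≤ x && x < e))).Nodup :=
    PySem.Set.nodup_ofList _
  have hmem : ∀ x : Int,
      x ∈ (PySem.List.pyRange s e 1).filter (fun i => bar.contains i)
        ↔ x ∈ PySem.Set.ofList (bar.filter (fun x => s ≤ x && x < e)) := by
    intro x
    simp [PySem.Set.mem_ofList, List.mem_filter, PySem.List.mem_pyRange_one,
      and_comm]
  have hperm := (List.perm_ext_iff_of_nodup h1 h2).2 hmem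
  rw [List.countP_eq_length_filter, hperm.length_eq]

-- ===== VERDICT (by name: the statement is the Claim_ definition above) =====
theorem confirm_pattern_length_spec : Claim_equal_confirm_pattern_length := by
  intro s e bar _
  show confirm_pattern_length s e bar = confirm_pattern_length_alt s e bar
  unfold confirm_pattern_length confirm_pattern_length_alt
  rw [PySem.List.foldl_if_add_one, count_eq]
  dsimp only
  split_ifs with h
  · exact (decide_eq_true h).symm
  · exact (decide_eq_false h).symm
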